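-- pv_equiv track=rewrite | github.com/sboomi/advent-of-code | code/2020/python/src/day_9.py | d9_p1
-- ===== SOURCE A (Python) =====
-- from typing import List
--
-- def d9_p1(numbers: List[int], size_preamble: int) -> int:
--     for i in range(len(numbers) - size_preamble):
--         preamble = numbers[0 + i : size_preamble + i]
--         next_num = numbers[size_preamble + i]
--         pairs = [(n, next_num - n) for i, n in enumerate(preamble) if next_num - n in preamble[:i] + preamble[i + 1 :]]
--         if not pairs:
--             return next_num
--     return -1
-- ===== SOURCE B (Python) =====
-- def d9_p1(numbers, size_preamble):
--     for j in range(size_preamble, len(numbers)):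
--         w = sorted(numbers[j - size_preamble:j])
--         t = numbers[j]
--         lo, hi = 0, len(w) - 1
--         found = False
--         while lo < hi:
--             s = w[lo] + w[hi]
--             if s == t:
--                 found = True
--                 break
--             elif s < t:
--                 lo += 1
--             else:
--                 hi -= 1
--         if not found:
--             return t
--     return -1
-- ===== Notes on version B (the rewrite author's own statement) =====
-- stated objective: faster
-- what changed: A checks each window element by a linear membership scan over two concatenated slices (quadratic per window); B sorts each window and runs the classical two-pointer two-sum scan over the sorted window (O(p log p) per window) — a different, order-based algorithm.
import Mathlib
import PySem

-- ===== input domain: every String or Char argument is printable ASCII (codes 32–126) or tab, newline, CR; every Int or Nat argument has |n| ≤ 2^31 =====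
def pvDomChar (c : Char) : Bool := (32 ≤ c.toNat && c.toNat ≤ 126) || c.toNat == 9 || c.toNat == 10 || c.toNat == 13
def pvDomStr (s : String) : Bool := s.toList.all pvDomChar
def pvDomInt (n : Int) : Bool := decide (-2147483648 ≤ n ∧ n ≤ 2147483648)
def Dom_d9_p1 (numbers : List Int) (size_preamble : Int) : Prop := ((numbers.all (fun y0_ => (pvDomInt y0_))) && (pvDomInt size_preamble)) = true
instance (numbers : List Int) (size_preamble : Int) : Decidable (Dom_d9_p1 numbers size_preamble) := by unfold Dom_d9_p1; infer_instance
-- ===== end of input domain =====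

-- B replaces A's per-position pair scan (slice concatenation + linear membership per element,
-- quadratic per window) by sorting each window and running the classical two-pointer two-sum
-- scan over the sorted window — a different algorithm (order-based, O(p log p) per window).

-- ===== PORT A =====
-- literal port of A's for-loop over i in range(len(numbers) - size_preamble)
def d9_p1_loopA (numbers : List Int) (s : Int) : List Int → Int
  | [] => -1
  | i :: rest =>
    let preamble := PySem.List.slice numbers (some (0 + i)) (some (s + i))
    let next_num := PySem.List.pyGetD numbers (s + i) 0  -- IndexError excluded by Pre_
    let pairs := ((PySem.List.enumerate preamble 0).filter (fun p =>
        (PySem.List.slice preamble none (some p.1) ++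
         PySem.List.slice preamble (some (p.1 + 1)) none).contains (next_num - p.2))).map
        (fun p => (p.2, next_num - p.2))
    if pairs = [] then next_num else d9_p1_loopA numbers s rest

def d9_p1 (numbers : List Int) (size_preamble : Int) : Int :=
  d9_p1_loopA numbers size_preamble
    (PySem.List.pyRange 0 (PySem.List.len numbers - size_preamble) 1)

-- ===== PORT B =====
-- literal port of B's while-loop: two pointers lo/hi over the sorted window
def twoPtrB (w : List Int) (t : Int) (lo hi : Int) : Bool :=
  if lo < hi then
    let s := PySem.List.pyGetD w lo 0 + PySem.List.pyGetD w hi 0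
    if s = t then true
    else if s < t then twoPtrB w t (lo + 1) hi
    else twoPtrB w t lo (hi - 1)
  else false
termination_by (hi - lo).toNat
decreasing_by all_goals omega

-- literal port of B's for-loop over j in range(size_preamble, len(numbers))
def d9_p1_loopB (numbers : List Int) (s : Int) : List Int → Int
  | [] => -1
  | j :: rest =>
    let w := PySem.List.sorted (PySem.List.slice numbers (some (j - s)) (some j)) (fun x => x) false
    let t := PySem.List.pyGetD numbers j 0  -- IndexError excluded by Pre_
    if twoPtrB w t 0 (PySem.List.len w - 1) then d9_p1_loopB numbers s rest else t

def d9_p1_alt (numbers : List Int) (size_preamble : Int) : Int :=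
  d9_p1_loopB numbers size_preamble
    (PySem.List.pyRange size_preamble (PySem.List.len numbers) 1)

-- ===== PRECONDITION & SPEC =====
-- Pre_ is exactly where Python A returns normally: for size_preamble < -len(numbers) the first
-- iteration's numbers[size_preamble] raises IndexError (B raises there too); on every other
-- input A returns and the equality below is claimed.
def Pre_d9_p1 (numbers : List Int) (size_preamble : Int) : Prop :=
  -(numbers.length : Int) ≤ size_preamble
instance (numbers : List Int) (size_preamble : Int) : Decidable (Pre_d9_p1 numbers size_preamble) := by unfold Pre_d9_p1; infer_instance

def pvWitness_d9_p1 : List Int × Int := ([1, 2, 3, 6, 4], 2)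

def Spec_d9_p1 (numbers : List Int) (size_preamble : Int) (out : Int) : Prop := out = d9_p1_alt numbers size_preamble
instance (numbers : List Int) (size_preamble : Int) (out : Int) : Decidable (Spec_d9_p1 numbers size_preamble out) := by unfold Spec_d9_p1; infer_instance

-- ===== CLAIM (what is proved, stated in full; the proofs are below) =====
def Claim_equal_d9_p1 : Prop := ∀ (numbers : List Int) (size_preamble : Int), Dom_d9_p1 numbers size_preamble → Pre_d9_p1 numbers size_preamble → Spec_d9_p1 numbers size_preamble (d9_p1 numbers size_preamble)

-- ===== LEMMAS AND PROOFS =====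

-- the common two-sum predicate of a window w against target t (multiset formulation)
def hasPair (w : List Int) (t : Int) : Prop :=
  ∃ n ∈ w, (if t - n = n then (2:Int) else 1) ≤ (w.count (t - n) : Int)

-- membership in the window with position k removed, as a count condition
lemma mem_take_append_drop_iff (w : List Int) (k : Nat) (hk : k < w.length) (x : Int) :
    x ∈ (w.take k ++ w.drop (k + 1)) ↔ (if x = w[k] then (2:Int) else 1) ≤ (w.count x : Int) := by
  have hw : w.take k ++ w[k] :: w.drop (k + 1) = w := by
    rw [List.getElem_cons_drop]; exact List.take_append_drop k w
  have hcnt : w.count x =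
      (w.take k).count x + (w.drop (k + 1)).count x + (if x = w[k] then 1 else 0) := by
    conv_lhs => rw [← hw]
    rw [List.count_append, List.count_cons]
    by_cases hx : x = w[k] <;> simp [hx] <;> omega
  rw [← List.count_pos_iff, List.count_append]
  by_cases hx : x = w[k]
  · rw [if_pos hx]; rw [if_pos hx] at hcnt; omega
  · rw [if_neg hx]; rw [if_neg hx] at hcnt; omega

-- A's filtered comprehension is nonempty exactly when the window has a pair
lemma filterA_ne_nil_iff (w : List Int) (t : Int) :
    ((PySem.List.enumerate w 0).filter (fun p =>
        (PySem.List.slice w none (some p.1) ++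
         PySem.List.slice w (some (p.1 + 1)) none).contains (t - p.2))) ≠ [] ↔ hasPair w t := by
  rw [← List.isEmpty_eq_false_iff, List.isEmpty_eq_false_iff_exists_mem]
  constructor
  · rintro ⟨p, hp⟩
    rw [List.mem_filter] at hp
    obtain ⟨hpmem, hpc⟩ := hp
    rw [PySem.List.mem_enumerate_iff] at hpmem
    obtain ⟨k, hk, rfl⟩ := hpmem
    simp only [zero_add] at hpc
    rw [PySem.List.slice_to_natCast] at hpc
    have h1 : ((k:Int) + 1) = ((k + 1 : Nat) : Int) := by push_cast; ring
    rw [h1, PySem.List.slice_from_natCast] at hpc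
    rw [List.contains_eq_mem, decide_eq_true_iff] at hpc
    rw [mem_take_append_drop_iff w k hk] at hpc
    exact ⟨w[k], List.getElem_mem hk, hpc⟩
  · rintro ⟨n, hn, hcnt⟩
    obtain ⟨k, hk, rfl⟩ := List.mem_iff_getElem.mp hn
    refine ⟨((k:Int), w[k]), ?_⟩
    rw [List.mem_filter]
    constructor
    · rw [PySem.List.mem_enumerate_iff]; exact ⟨k, hk, by simp⟩
    · simp only
      rw [PySem.List.slice_to_natCast]
      have h1 : ((k:Int) + 1) = ((k + 1 : Nat) : Int) := by push_cast; ring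
      rw [h1, PySem.List.slice_from_natCast]
      rw [List.contains_eq_mem, decide_eq_true_iff]
      exact (mem_take_append_drop_iff w k hk _).mpr hcnt

-- hasPair only depends on the multiset of the window
lemma hasPair_perm {w w' : List Int} (h : w.Perm w') (t : Int) : hasPair w t ↔ hasPair w' t := by
  unfold hasPair
  constructor <;> rintro ⟨n, hn, hc⟩
  · exact ⟨n, h.mem_iff.mp hn, by rwa [← h.count_eq]⟩
  · exact ⟨n, h.mem_iff.mpr hn, by rwa [h.count_eq]⟩

-- hasPair as a pair of distinct positions summing to t
lemma hasPair_iff_indices (l : List Int) (t : Int) :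
    hasPair l t ↔ ∃ i j : Nat, i < j ∧ j < l.length ∧ l.getD i 0 + l.getD j 0 = t := by
  constructor
  · rintro ⟨n, hn, hc⟩
    by_cases hd : t - n = n
    · rw [if_pos hd, hd] at hc
      have h2 : 2 ≤ l.count n := by exact_mod_cast hc
      obtain ⟨i, j, hij, hx, hy⟩ :=
        List.duplicate_iff_exists_distinct_get.mp (List.duplicate_iff_two_le_count.mpr h2)
      refine ⟨i, j, hij, j.isLt, ?_⟩
      rw [List.getD_eq_getElem l 0 i.isLt, List.getD_eq_getElem l 0 j.isLt]
      simp only [List.get_eq_getElem] at hx hy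
      rw [← hx, ← hy]; omega
    · rw [if_neg hd] at hc
      have h1 : 0 < l.count (t - n) := by omega
      obtain ⟨k, hk, hkv⟩ := List.mem_iff_getElem.mp (List.count_pos_iff.mp h1)
      obtain ⟨i, hi, hiv⟩ := List.mem_iff_getElem.mp hn
      have hne : i ≠ k := by rintro rfl; rw [hiv] at hkv; omega
      rcases Nat.lt_or_ge i k with hik | hik
      · exact ⟨i, k, hik, hk, by rw [List.getD_eq_getElem l 0 hi, List.getD_eq_getElem l 0 hk, hiv, hkv]; ring⟩
      · have hki : k < i := by omega
        exact ⟨k, i, hki, hi, by rw [List.getD_eq_getElem l 0 hk, List.getD_eq_getElem l 0 hi, hiv, hkv]; ring⟩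
  · rintro ⟨i, j, hij, hj, hsum⟩
    have hi : i < l.length := by omega
    rw [List.getD_eq_getElem l 0 hi, List.getD_eq_getElem l 0 hj] at hsum
    refine ⟨l[i], List.getElem_mem hi, ?_⟩
    by_cases hd : t - l[i] = l[i]
    · rw [if_pos hd]
      have h2 : 2 ≤ l.count l[i] := by
        apply List.duplicate_iff_two_le_count.mp
        apply List.duplicate_iff_exists_distinct_get.mpr
        exact ⟨⟨i, hi⟩, ⟨j, hj⟩, hij, by simp, by simp only [List.get_eq_getElem]; omega⟩
      rw [hd]; exact_mod_cast h2
    · rw [if_neg hd]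
      have : t - l[i] = l[j] := by omega
      rw [this]
      have : 0 < l.count l[j] := List.count_pos_iff.mpr (List.getElem_mem hj)
      exact_mod_cast this

-- monotonicity of a Pairwise-(≤) list, in getD form
lemma sorted_getD_mono {w : List Int} (hs : w.Pairwise (· ≤ ·)) {i j : Nat}
    (hij : i ≤ j) (hj : j < w.length) : w.getD i 0 ≤ w.getD j 0 := by
  rcases Nat.lt_or_ge i j with h | h
  · rw [List.getD_eq_getElem w 0 (by omega), List.getD_eq_getElem w 0 hj]
    exact (List.pairwise_iff_getElem.mp hs) i j (by omega) hj h
  · have : i = j := by omega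
    subst this; rfl

-- the two-pointer scan decides "some pair of positions in [lo, hi] sums to t" on a sorted window
lemma twoPtrB_true_iff (w : List Int) (t : Int) (hs : w.Pairwise (· ≤ ·)) (lo hi : Int)
    (hlo : 0 ≤ lo) (hhi : hi < (w.length : Int)) :
    twoPtrB w t lo hi = true ↔
      ∃ i j : Nat, lo ≤ (i : Int) ∧ i < j ∧ (j : Int) ≤ hi ∧ w.getD i 0 + w.getD j 0 = t := by
  rw [twoPtrB]
  by_cases h : lo < hi
  · rw [if_pos h]
    have hloN : lo = ((lo.toNat : Nat) : Int) := (Int.toNat_of_nonneg hlo).symm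
    have hhiN : hi = ((hi.toNat : Nat) : Int) := (Int.toNat_of_nonneg (by omega)).symm
    have hglo : PySem.List.pyGetD w lo 0 = w.getD lo.toNat 0 := by
      rw [hloN, PySem.List.pyGetD_natCast]; simp [max_eq_left hlo]
    have hghi : PySem.List.pyGetD w hi 0 = w.getD hi.toNat 0 := by
      rw [hhiN, PySem.List.pyGetD_natCast]; simp [max_eq_left (by omega : (0:Int) ≤ hi)]
    simp only [hglo, hghi]
    by_cases heq : w.getD lo.toNat 0 + w.getD hi.toNat 0 = t
    · rw [if_pos heq]
      simp only [true_iff]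
      exact ⟨lo.toNat, hi.toNat, by omega, by omega, by omega, heq⟩
    · rw [if_neg heq]
      by_cases hlt : w.getD lo.toNat 0 + w.getD hi.toNat 0 < t
      · rw [if_pos hlt, twoPtrB_true_iff w t hs (lo + 1) hi (by omega) hhi]
        constructor
        · rintro ⟨i, j, h1, h2, h3, h4⟩; exact ⟨i, j, by omega, h2, h3, h4⟩
        · rintro ⟨i, j, h1, h2, h3, h4⟩
          refine ⟨i, j, ?_, h2, h3, h4⟩
          by_contra hcon
          have hieq : i = lo.toNat := by omega
          have hle : w.getD j 0 ≤ w.getD hi.toNat 0 :=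
            sorted_getD_mono hs (by omega) (by omega)
          rw [hieq] at h4; omega
      · rw [if_neg hlt, twoPtrB_true_iff w t hs lo (hi - 1) hlo (by omega)]
        constructor
        · rintro ⟨i, j, h1, h2, h3, h4⟩; exact ⟨i, j, h1, h2, by omega, h4⟩
        · rintro ⟨i, j, h1, h2, h3, h4⟩
          refine ⟨i, j, h1, h2, ?_, h4⟩
          by_contra hcon
          have hjeq : j = hi.toNat := by omega
          have hle : w.getD lo.toNat 0 ≤ w.getD i 0 :=
            sorted_getD_mono hs (by omega) (by omega)
          rw [hjeq] at h4; omega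
  · rw [if_neg h]
    simp only [Bool.false_eq_true, false_iff]
    rintro ⟨i, j, h1, h2, h3, _⟩
    omega
termination_by (hi - lo).toNat
decreasing_by all_goals omega

-- B's per-window check (two pointers over the sorted window) decides hasPair of the window
lemma twoPtrB_sorted_iff (w : List Int) (t : Int) :
    (twoPtrB (PySem.List.sorted w (fun x => x) false) t 0
       (PySem.List.len (PySem.List.sorted w (fun x => x) false) - 1) = true) ↔ hasPair w t := by
  set w' := PySem.List.sorted w (fun x => x) false with hw'
  have hperm : w'.Perm w := PySem.List.sorted_perm w (fun x => x) false
  have hs : w'.Pairwise (· ≤ ·) := by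
    have := PySem.List.sorted_pairwise w (fun x => x)
    simpa using this
  have hlen : PySem.List.len w' = (w'.length : Int) := PySem.List.len_eq w'
  rw [twoPtrB_true_iff w' t hs 0 (PySem.List.len w' - 1) le_rfl (by omega)]
  rw [← hasPair_perm hperm t, hasPair_iff_indices]
  constructor
  · rintro ⟨i, j, h1, h2, h3, h4⟩
    refine ⟨i, j, h2, ?_, h4⟩
    omega
  · rintro ⟨i, j, h2, h3, h4⟩
    refine ⟨i, j, by omega, h2, ?_, h4⟩
    omega

-- the two loops agree, windows aligned by j = s + i
lemma loop_eq (numbers : List Int) (s : Int) (i : Int) :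
    d9_p1_loopA numbers s (PySem.List.pyRange i ((numbers.length : Int) - s) 1) =
    d9_p1_loopB numbers s (PySem.List.pyRange (s + i) (numbers.length : Int) 1) := by
  by_cases hend : (numbers.length : Int) - s ≤ i
  · rw [PySem.List.pyRange_one_eq_nil hend, PySem.List.pyRange_one_eq_nil (by omega)]
    rfl
  · have hlt : i < (numbers.length : Int) - s := by omega
    have hlt2 : s + i < (numbers.length : Int) := by omega
    rw [PySem.List.pyRange_one_cons hlt, PySem.List.pyRange_one_cons hlt2]
    simp only [d9_p1_loopA, d9_p1_loopB]
    have e1 : (0:Int) + i = i := by ring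
    have e2 : s + i - s = i := by ring
    rw [e1, e2]
    set w := PySem.List.slice numbers (some i) (some (s + i)) with hwdef
    set t := PySem.List.pyGetD numbers (s + i) 0 with htdef
    by_cases hp : hasPair w t
    · rw [if_neg, if_pos]
      · have e3 : s + i + 1 = s + (i + 1) := by ring
        rw [e3]
        exact loop_eq numbers s (i + 1)
      · exact (twoPtrB_sorted_iff w t).mpr hp
      · intro hnil
        exact (filterA_ne_nil_iff w t).mpr hp (List.map_eq_nil_iff.mp hnil)
    · rw [if_pos, if_neg]
      · intro hany
        exact hp ((twoPtrB_sorted_iff w t).mp hany)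
      · by_contra hne
        exact hp ((filterA_ne_nil_iff w t).mp (fun h => hne (by rw [h, List.map_nil])))
termination_by ((numbers.length : Int) - s - i).toNat
decreasing_by omega

-- ===== VERDICT (by name: the statement is the Claim_ definition above) =====
theorem d9_p1_spec : Claim_equal_d9_p1 := by
  intro numbers size_preamble _hdom hpre
  unfold Spec_d9_p1 d9_p1 d9_p1_alt
  have := loop_eq numbers size_preamble 0
  simpa [PySem.List.len_eq] using this
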